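-- pv_equiv track=rewrite | github.com/12vectors/carta | tools/carta_checks.py | _count_tradeoffs_rows
-- ===== SOURCE A (Python) =====
-- def _count_tradeoffs_rows(text: str) -> int:
--     """Count data rows in the Trade-offs markdown table.
--
--     The table format is:
--         | Gain | Cost |
--         |------|------|
--         | ...  | ...  |
--     """
--     rows = 0
--     for line in text.splitlines():
--         stripped = line.strip()
--         if not stripped.startswith("|"):
--             continue
--         # Skip the header row and separator row
--         if set(stripped.replace("|", "").strip()) <= set("-: "):
--             continue  # separator
--         # Heuristic: the header row contains "Gain" and "Cost"
--         lower = stripped.lower()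
--         if "gain" in lower and "cost" in lower and rows == 0:
--             continue
--         rows += 1
--     return rows
-- ===== SOURCE B (Python) =====
-- def _count_tradeoffs_rows(text: str) -> int:
--     """Count data rows in the Trade-offs markdown table (staged version)."""
--     def is_separator(s):
--         return set(s.replace("|", "").strip()) <= set("-: ")
--
--     def is_header(s):
--         low = s.lower()
--         return "gain" in low and "cost" in low
--
--     stripped = [line.strip() for line in text.splitlines()]
--     cand = [s for s in stripped if s.startswith("|") and not is_separator(s)]
--     rest = cand
--     while rest and is_header(rest[0]):
--         rest = rest[1:]
--     return len(rest)
-- ===== Notes on version B (the rewrite author's own statement) =====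
-- stated objective: simpler
-- what changed: Replaces the single stateful loop (counter with a rows==0-guarded skip) by a staged pipeline: strip all lines, filter to candidate rows, drop the leading prefix of header-like rows, return the length of the rest.
import Mathlib
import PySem

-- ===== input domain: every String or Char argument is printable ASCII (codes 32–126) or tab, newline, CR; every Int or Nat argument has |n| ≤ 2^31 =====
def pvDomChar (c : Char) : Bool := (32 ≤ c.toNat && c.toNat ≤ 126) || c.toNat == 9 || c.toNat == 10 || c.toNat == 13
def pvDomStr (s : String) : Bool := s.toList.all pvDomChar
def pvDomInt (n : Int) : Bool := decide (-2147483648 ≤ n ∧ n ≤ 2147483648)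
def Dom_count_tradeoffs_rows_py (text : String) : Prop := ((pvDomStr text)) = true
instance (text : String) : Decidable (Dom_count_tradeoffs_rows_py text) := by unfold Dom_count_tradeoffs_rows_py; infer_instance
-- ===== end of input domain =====

-- B replaces A's stateful counter loop by a staged pipeline (strip, filter candidates, dropWhile header, length); same result, same cost.

-- ===== PORT A =====
-- literal transliteration of A's loop: rows accumulator folded over splitlines
def count_tradeoffs_rows_py (text : String) : Int :=
  (PySem.Str.splitlines text).foldl (fun rows line =>
    let stripped := PySem.Str.strip line
    if !(PySem.Str.startswith stripped "|") then rows
    else if (PySem.Str.strip (PySem.Str.replace stripped "|" "")).toList.all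
              (fun c => c == '-' || c == ':' || c == ' ') then rows
    else
      let lower := PySem.Str.lower stripped
      if PySem.Str.isIn "gain" lower && PySem.Str.isIn "cost" lower && rows == 0 then rows
      else rows + 1) 0

-- ===== PORT B =====
-- Source B's is_separator
def pvIsSeparator (s : String) : Bool :=
  (PySem.Str.strip (PySem.Str.replace s "|" "")).toList.all
    (fun c => c == '-' || c == ':' || c == ' ')

-- Source B's is_header
def pvIsHeader (s : String) : Bool :=
  let low := PySem.Str.lower s
  PySem.Str.isIn "gain" low && PySem.Str.isIn "cost" low

def count_tradeoffs_rows_py_alt (text : String) : Int :=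
  let stripped := (PySem.Str.splitlines text).map PySem.Str.strip
  let cand := stripped.filter (fun s => PySem.Str.startswith s "|" && !pvIsSeparator s)
  let rest := cand.dropWhile pvIsHeader
  (rest.length : Int)

-- ===== PRECONDITION & SPEC =====
def Spec_count_tradeoffs_rows_py (text : String) (out : Int) : Prop := out = count_tradeoffs_rows_py_alt text
instance (text : String) (out : Int) : Decidable (Spec_count_tradeoffs_rows_py text out) := by unfold Spec_count_tradeoffs_rows_py; infer_instance

-- ===== CLAIM (what is proved, stated in full; the proofs are below) =====
def Claim_equal_count_tradeoffs_rows_py : Prop := ∀ (text : String), Dom_count_tradeoffs_rows_py text → Spec_count_tradeoffs_rows_py text (count_tradeoffs_rows_py text)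

-- ===== LEMMAS AND PROOFS =====

-- A's loop body, named for the proofs
def pvStep (rows : Int) (line : String) : Int :=
  let stripped := PySem.Str.strip line
  if !(PySem.Str.startswith stripped "|") then rows
  else if (PySem.Str.strip (PySem.Str.replace stripped "|" "")).toList.all
            (fun c => c == '-' || c == ':' || c == ' ') then rows
  else
    let lower := PySem.Str.lower stripped
    if PySem.Str.isIn "gain" lower && PySem.Str.isIn "cost" lower && rows == 0 then rows
    else rows + 1

-- normal form of A's loop body in terms of B's predicates
theorem pvStep_eq (r : Int) (line : String) :
    pvStep r line =
      if PySem.Str.startswith (PySem.Str.strip line) "|" && !pvIsSeparator (PySem.Str.strip line) then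
        (if pvIsHeader (PySem.Str.strip line) && r == 0 then r else r + 1)
      else r := by
  simp only [pvStep, pvIsSeparator, pvIsHeader]
  cases h1 : PySem.Str.startswith (PySem.Str.strip line) "|" <;>
    cases h2 : (PySem.Str.strip (PySem.Str.replace (PySem.Str.strip line) "|" "")).toList.all
        (fun c => c == '-' || c == ':' || c == ' ') <;>
      simp [Bool.and_assoc]

-- once rows is positive the gain/cost guard is dead: the fold just counts candidate rows
theorem pv_fold_pos (ls : List String) : ∀ (r : Int), 0 < r →
    ls.foldl pvStep r =
      r + ((ls.map PySem.Str.strip).filter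
            (fun s => PySem.Str.startswith s "|" && !pvIsSeparator s)).length := by
  induction ls with
  | nil => intro r _; simp
  | cons l ls ih =>
    intro r hr
    rw [List.foldl_cons, pvStep_eq, List.map_cons, List.filter_cons]
    have hz : (r == 0) = false := by simp; omega
    cases hc : PySem.Str.startswith (PySem.Str.strip l) "|" && !pvIsSeparator (PySem.Str.strip l) with
    | false =>
      simp only [Bool.false_eq_true, if_false]
      exact ih r hr
    | true =>
      simp only [hz, Bool.and_false, Bool.false_eq_true, if_false, if_true]
      rw [ih (r + 1) (by omega)]
      simp; omega
-- while rows = 0 the fold drops leading candidate header rows: from 0 it computes B's pipeline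
theorem pv_fold_zero (ls : List String) :
    ls.foldl pvStep 0 =
      ((((ls.map PySem.Str.strip).filter
          (fun s => PySem.Str.startswith s "|" && !pvIsSeparator s)).dropWhile pvIsHeader).length : Int) := by
  induction ls with
  | nil => simp
  | cons l ls ih =>
    rw [List.foldl_cons, pvStep_eq, List.map_cons, List.filter_cons]
    cases hc : PySem.Str.startswith (PySem.Str.strip l) "|" && !pvIsSeparator (PySem.Str.strip l) with
    | false =>
      simp only [Bool.false_eq_true, if_false]
      exact ih
    | true =>
      simp only [if_true, List.dropWhile_cons]
      cases hh : pvIsHeader (PySem.Str.strip l) with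
      | true =>
        simp only [Bool.true_and, if_true]
        have : ((0 : Int) == 0) = true := by decide
        simp only [this]
        exact ih
      | false =>
        simp only [Bool.false_and, Bool.false_eq_true, if_false]
        rw [zero_add, pv_fold_pos ls 1 (by omega)]
        simp [add_comm]

-- ===== VERDICT (by name: the statement is the Claim_ definition above) =====
theorem count_tradeoffs_rows_py_spec : Claim_equal_count_tradeoffs_rows_py := by
  intro text _
  show count_tradeoffs_rows_py text = count_tradeoffs_rows_py_alt text
  unfold count_tradeoffs_rows_py count_tradeoffs_rows_py_alt
  exact pv_fold_zero (PySem.Str.splitlines text)
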